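-- pv_equiv track=rewrite | github.com/Triston-Gregoire/RewardsBot | src/Trends.py | organize_search_terms
-- ===== SOURCE A (Python) =====
-- def organize_search_terms(search_term_list):
--     desktop_terms = []
--     mobile_terms = []
--     for index, value in enumerate(search_term_list):
--         if len(desktop_terms) < 30:
--             desktop_terms.extend(value)
--         else:
--             if len(mobile_terms) < 20:
--                 mobile_terms.extend(value)
--             else:
--                 break
--     return desktop_terms, mobile_terms
-- ===== SOURCE B (Python) =====
-- from bisect import bisect_left
-- from itertools import accumulate, chain
--
-- def organize_search_terms(search_term_list):
--     # prefix[i] = total number of terms in the first i chunks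
--     prefix = list(accumulate((len(v) for v in search_term_list), initial=0))
--     n = len(search_term_list)
--     # chunk i joins desktop iff the total length before it is < 30
--     k = bisect_left(prefix, 30, 0, n)
--     # chunk i (i >= k) joins mobile iff its mobile-relative prefix is < 20
--     j = bisect_left(prefix, prefix[k] + 20, k, n)
--     desktop_terms = list(chain.from_iterable(search_term_list[:k]))
--     mobile_terms = list(chain.from_iterable(search_term_list[k:j]))
--     return desktop_terms, mobile_terms
-- ===== Notes on version B (the rewrite author's own statement) =====
-- stated objective: alternative
-- what changed: Replaced A's per-chunk accumulation loop by index arithmetic: build the prefix-sum table of chunk lengths once (itertools.accumulate), locate the desktop and mobile cut indices with bisect_left binary searches, and produce both buckets by slicing and flattening.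
import Mathlib
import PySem

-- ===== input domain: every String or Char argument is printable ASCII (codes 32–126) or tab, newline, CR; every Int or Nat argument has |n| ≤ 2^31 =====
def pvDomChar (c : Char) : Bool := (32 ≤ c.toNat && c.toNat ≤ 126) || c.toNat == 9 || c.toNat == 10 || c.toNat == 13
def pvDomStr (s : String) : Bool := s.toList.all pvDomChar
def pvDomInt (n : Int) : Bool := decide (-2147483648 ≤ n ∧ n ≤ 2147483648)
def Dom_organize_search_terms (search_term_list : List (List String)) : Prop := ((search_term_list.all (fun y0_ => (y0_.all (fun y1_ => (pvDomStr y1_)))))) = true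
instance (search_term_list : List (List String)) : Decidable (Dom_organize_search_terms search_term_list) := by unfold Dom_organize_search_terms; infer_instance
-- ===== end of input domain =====

-- B computes the two cut indices by binary search over a prefix-sum table and slices, instead of A's per-chunk accumulation loop; alternative algorithm, same return value.


-- ===== PORT A =====
-- A's single loop over (desktop, mobile) with the cap branches in A's order
def organizeGoA : List (List String) → List String → List String → List String × List String
  | [], d, m => (d, m)
  | v :: rest, d, m =>
    if d.length < 30 then organizeGoA rest (d ++ v) m
    else if m.length < 20 then organizeGoA rest d (m ++ v)
    else (d, m)

def organize_search_terms (search_term_list : List (List String)) : List String × List String :=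
  organizeGoA search_term_list [] []

-- ===== PORT B =====
-- itertools.accumulate(lengths, initial=0): the n+1 prefix sums of the chunk lengths
def pvAccumB : List (List String) → Int → List Int
  | [], acc => [acc]
  | v :: r, acc => acc :: pvAccumB r (acc + (v.length : Int))

-- bisect.bisect_left(a, x, lo, hi), step for step; getD is exact because bisect
-- only reads indices in [lo, hi), which Source B keeps inside the list
def bisectLeftB (a : List Int) (x : Int) (lo hi : Nat) : Nat :=
  if lo < hi then
    if a.getD ((lo + hi) / 2) 0 < x then bisectLeftB a x ((lo + hi) / 2 + 1) hi
    else bisectLeftB a x lo ((lo + hi) / 2)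
  else lo
termination_by hi - lo
decreasing_by all_goals omega

-- l[:k] = take k, l[k:j] = drop k then take (j-k): exact for the Nat indices Source B uses
def organize_search_terms_alt (search_term_list : List (List String)) : List String × List String :=
  let pref := pvAccumB search_term_list 0
  let n := search_term_list.length
  let k := bisectLeftB pref 30 0 n
  let j := bisectLeftB pref (pref.getD k 0 + 20) k n
  ((search_term_list.take k).flatten, ((search_term_list.drop k).take (j - k)).flatten)

-- ===== PRECONDITION & SPEC =====
def Spec_organize_search_terms (search_term_list : List (List String)) (out : List String × List String) : Prop := out = organize_search_terms_alt search_term_list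
instance (search_term_list : List (List String)) (out : List String × List String) : Decidable (Spec_organize_search_terms search_term_list out) := by unfold Spec_organize_search_terms; infer_instance

-- ===== CLAIM (what is proved, stated in full; the proofs are below) =====
def Claim_equal_organize_search_terms : Prop := ∀ (search_term_list : List (List String)), Dom_organize_search_terms search_term_list → Spec_organize_search_terms search_term_list (organize_search_terms search_term_list)

-- ===== LEMMAS AND PROOFS =====

-- proof-only helpers --------------------------------------------------------

-- mobile-only run of A's loop (desktop already full)
def goM : List (List String) → List String → List String
  | [], m => m
  | v :: rest, m => if m.length < 20 then goM rest (m ++ v) else m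

-- number of leading chunks taken while the running total stays below the cap
def pvFst : List (List String) → Int → Int → Nat
  | [], _, _ => 0
  | v :: r, acc, cap => if acc < cap then pvFst r (acc + (v.length : Int)) cap + 1 else 0

-- total number of terms in a chunk list
def sumL : List (List String) → Int
  | [] => 0
  | v :: r => (v.length : Int) + sumL r

-- pvAccumB without its final entry
def accHead : List (List String) → Int → List Int
  | [], _ => []
  | v :: r, acc => acc :: accHead r (acc + (v.length : Int))

-- linear version of bisect_left
def pvLin (a : List Int) (x : Int) (lo hi : Nat) : Nat :=
  if lo < hi then (if a.getD lo 0 < x then pvLin a x (lo + 1) hi else lo) else lo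
termination_by hi - lo
decreasing_by omega

-- one-step equations ---------------------------------------------------------

theorem goM_cons (v : List String) (rest : List (List String)) (m : List String) :
    goM (v :: rest) m = if m.length < 20 then goM rest (m ++ v) else m := rfl

theorem goA_cons (v : List String) (rest : List (List String)) (d m : List String) :
    organizeGoA (v :: rest) d m =
      if d.length < 30 then organizeGoA rest (d ++ v) m
      else if m.length < 20 then organizeGoA rest d (m ++ v) else (d, m) := rfl

theorem pvFst_cons (v : List String) (r : List (List String)) (acc cap : Int) :
    pvFst (v :: r) acc cap =
      if acc < cap then pvFst r (acc + (v.length : Int)) cap + 1 else 0 := rfl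

theorem pvLin_eq (a : List Int) (x : Int) (lo hi : Nat) :
    pvLin a x lo hi =
      if lo < hi then (if a.getD lo 0 < x then pvLin a x (lo + 1) hi else lo) else lo := by
  conv_lhs => rw [pvLin]

theorem pvLin_base (a : List Int) (x : Int) (lo hi : Nat) (h : ¬ lo < hi) :
    pvLin a x lo hi = lo := by
  rw [pvLin_eq, if_neg h]

theorem pvLin_stop_at (a : List Int) (x : Int) (lo hi : Nat)
    (h : ¬ a.getD lo 0 < x) : pvLin a x lo hi = lo := by
  rw [pvLin_eq]
  by_cases hlh : lo < hi
  · rw [if_pos hlh, if_neg h]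
  · rw [if_neg hlh]

theorem pvLin_step (a : List Int) (x : Int) (lo hi : Nat)
    (h1 : lo < hi) (h2 : a.getD lo 0 < x) :
    pvLin a x lo hi = pvLin a x (lo + 1) hi := by
  rw [pvLin_eq, if_pos h1, if_pos h2]

theorem bl_eq (a : List Int) (x : Int) (lo hi : Nat) :
    bisectLeftB a x lo hi =
      if lo < hi then
        if a.getD ((lo + hi) / 2) 0 < x then bisectLeftB a x ((lo + hi) / 2 + 1) hi
        else bisectLeftB a x lo ((lo + hi) / 2)
      else lo := by
  conv_lhs => rw [bisectLeftB]

-- A-side characterisation ---------------------------------------------------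

theorem organizeGoA_mobile (l : List (List String)) (d m : List String)
    (h : ¬ d.length < 30) : organizeGoA l d m = (d, goM l m) := by
  induction l generalizing m with
  | nil => simp [organizeGoA, goM]
  | cons v rest ih =>
    rw [goA_cons, goM_cons, if_neg h]
    by_cases hm : m.length < 20
    · rw [if_pos hm, if_pos hm, ih]
    · rw [if_neg hm, if_neg hm]

theorem goM_eq (l : List (List String)) (m : List String) :
    goM l m = m ++ (l.take (pvFst l (m.length : Int) 20)).flatten := by
  induction l generalizing m with
  | nil => simp [goM, pvFst]
  | cons v rest ih =>
    rw [goM_cons, pvFst_cons]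
    by_cases hm : m.length < 20
    · rw [if_pos hm, if_pos (by exact_mod_cast hm), ih (m ++ v)]
      have harg : ((m ++ v).length : Int) = (m.length : Int) + (v.length : Int) := by
        push_cast [List.length_append]; ring
      rw [harg]
      simp
    · rw [if_neg hm, if_neg (by exact_mod_cast hm)]
      simp

theorem goA_desktop (l : List (List String)) (d : List String) :
    organizeGoA l d [] =
      (d ++ (l.take (pvFst l (d.length : Int) 30)).flatten,
       goM (l.drop (pvFst l (d.length : Int) 30)) []) := by
  induction l generalizing d with
  | nil => simp [organizeGoA, pvFst, goM]
  | cons v rest ih =>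
    rw [pvFst_cons]
    by_cases hd : d.length < 30
    · rw [goA_cons, if_pos hd, if_pos (by exact_mod_cast hd), ih (d ++ v)]
      have harg : ((d ++ v).length : Int) = (d.length : Int) + (v.length : Int) := by
        push_cast [List.length_append]; ring
      rw [harg]
      simp
    · rw [organizeGoA_mobile _ _ _ hd, if_neg (by exact_mod_cast hd)]
      simp

-- prefix-sum facts ----------------------------------------------------------

theorem sumL_nonneg (l : List (List String)) : 0 ≤ sumL l := by
  induction l with
  | nil => simp [sumL]
  | cons v r ih => simp only [sumL]; positivity

theorem sumL_append (s t : List (List String)) : sumL (s ++ t) = sumL s + sumL t := by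
  induction s with
  | nil => simp [sumL]
  | cons v r ih => simp only [List.cons_append, sumL, ih]; ring

theorem pvAccumB_append (t r : List (List String)) (a : Int) :
    pvAccumB (t ++ r) a = accHead t a ++ pvAccumB r (a + sumL t) := by
  induction t generalizing a with
  | nil => simp [accHead, sumL]
  | cons v s ih =>
    simp only [List.cons_append, pvAccumB, accHead, sumL, ih]
    rw [add_assoc]

theorem accHead_length (t : List (List String)) (a : Int) :
    (accHead t a).length = t.length := by
  induction t generalizing a with
  | nil => simp [accHead]
  | cons v s ih => simp [accHead, ih]

theorem pvAccumB_length (l : List (List String)) (a : Int) :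
    (pvAccumB l a).length = l.length + 1 := by
  induction l generalizing a with
  | nil => simp [pvAccumB]
  | cons v r ih => simp [pvAccumB, ih]

theorem pvAccumB_getD (l : List (List String)) (a : Int) (i : Nat) (hi : i ≤ l.length) :
    (pvAccumB l a).getD i 0 = a + sumL (l.take i) := by
  induction l generalizing a i with
  | nil =>
    have h0 : i = 0 := by simpa using hi
    subst h0; simp [pvAccumB, sumL]
  | cons v r ih =>
    cases i with
    | zero => simp [pvAccumB, sumL]
    | succ i =>
      simp only [pvAccumB, List.getD_cons_succ, List.take_succ_cons, sumL]
      rw [ih _ _ (by simpa using hi), add_assoc]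

theorem pvAccumB_mono (l : List (List String)) (a : Int) (i j : Nat)
    (hij : i ≤ j) (hj : j ≤ l.length) :
    (pvAccumB l a).getD i 0 ≤ (pvAccumB l a).getD j 0 := by
  rw [pvAccumB_getD l a i (le_trans hij hj), pvAccumB_getD l a j hj]
  have hsplit : l.take j = l.take i ++ (l.drop i).take (j - i) := by
    rw [← List.take_add]; congr 1; omega
  rw [hsplit, sumL_append]
  have := sumL_nonneg ((l.drop i).take (j - i))
  omega

-- bisect = linear scan on a monotone list ------------------------------------

theorem pvLin_skip (a : List Int) (x : Int) (hi : Nat) :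
    ∀ d lo m, m - lo ≤ d → lo ≤ m → m ≤ hi →
      (∀ i, lo ≤ i → i < m → a.getD i 0 < x) →
      pvLin a x lo hi = pvLin a x m hi := by
  intro d
  induction d with
  | zero =>
    intro lo m h1 h2 _ _
    have hlm : lo = m := by omega
    subst hlm; rfl
  | succ d ih =>
    intro lo m h1 h2 h3 h4
    by_cases hlm : lo = m
    · subst hlm; rfl
    · have hlt : lo < m := by omega
      rw [pvLin_step a x lo hi (by omega) (h4 lo le_rfl hlt)]
      exact ih (lo + 1) m (by omega) (by omega) h3 (fun i hi1 hi2 => h4 i (by omega) hi2)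

theorem pvLin_stop (a : List Int) (x : Int) (hi : Nat) :
    ∀ d lo m, m - lo ≤ d → lo ≤ m → m ≤ hi →
      (∀ i, m ≤ i → i < hi → ¬ a.getD i 0 < x) →
      pvLin a x lo hi = pvLin a x lo m := by
  intro d
  induction d with
  | zero =>
    intro lo m h1 h2 h3 h4
    have hlm : lo = m := by omega
    subst hlm
    by_cases hh : lo < hi
    · rw [pvLin_stop_at a x lo hi (h4 lo le_rfl hh), pvLin_base a x lo lo (by omega)]
    · rw [pvLin_base a x lo hi hh, pvLin_base a x lo lo (by omega)]
  | succ d ih =>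
    intro lo m h1 h2 h3 h4
    by_cases hlm : lo = m
    · subst hlm
      by_cases hh : lo < hi
      · rw [pvLin_stop_at a x lo hi (h4 lo le_rfl hh), pvLin_base a x lo lo (by omega)]
      · rw [pvLin_base a x lo hi hh, pvLin_base a x lo lo (by omega)]
    · have hlt : lo < m := by omega
      by_cases hx : a.getD lo 0 < x
      · rw [pvLin_step a x lo hi (by omega) hx, pvLin_step a x lo m hlt hx]
        exact ih (lo + 1) m (by omega) (by omega) h3 h4
      · rw [pvLin_stop_at a x lo hi hx, pvLin_stop_at a x lo m hx]

theorem bl_eq_lin (a : List Int) (x : Int)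
    (hm : ∀ i j, i ≤ j → j < a.length → a.getD i 0 ≤ a.getD j 0) :
    ∀ d lo hi, hi - lo ≤ d → hi ≤ a.length → bisectLeftB a x lo hi = pvLin a x lo hi := by
  intro d
  induction d with
  | zero =>
    intro lo hi h1 _
    have h : ¬ lo < hi := by omega
    rw [pvLin_base a x lo hi h, bl_eq, if_neg h]
  | succ d ih =>
    intro lo hi h1 h2
    by_cases h : lo < hi
    · by_cases hx : a.getD ((lo + hi) / 2) 0 < x
      · rw [bl_eq, if_pos h, if_pos hx]
        rw [ih ((lo + hi) / 2 + 1) hi (by omega) h2]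
        exact (pvLin_skip a x hi ((lo + hi) / 2 + 1 - lo) lo ((lo + hi) / 2 + 1)
          le_rfl (by omega) (by omega)
          (fun i hi1 hi2 => lt_of_le_of_lt
            (hm i ((lo + hi) / 2) (by omega) (by omega)) hx)).symm
      · rw [bl_eq, if_pos h, if_neg hx]
        rw [ih lo ((lo + hi) / 2) (by omega) (by omega)]
        exact (pvLin_stop a x hi ((lo + hi) / 2 - lo) lo ((lo + hi) / 2)
          le_rfl (by omega) (by omega)
          (fun i hi1 hi2 => by
            have := hm ((lo + hi) / 2) i hi1 (by omega)
            omega)).symm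
    · rw [pvLin_base a x lo hi h, bl_eq, if_neg h]

-- linear bisect on a prefix list = the threaded count -------------------------

theorem getD_append_cons (pre : List Int) (c : Int) (t : List Int) :
    (pre ++ c :: t).getD pre.length 0 = c := by
  induction pre with
  | nil => simp
  | cons p ps ih => simp

theorem pvLin_accum (x : Int) :
    ∀ (l : List (List String)) (a : Int) (pre : List Int),
      pvLin (pre ++ pvAccumB l a) x pre.length (pre.length + l.length) =
        pre.length + pvFst l a x := by
  intro l
  induction l with
  | nil =>
    intro a pre
    rw [pvLin_base _ x _ _ (by simp), pvFst]
    simp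
  | cons v r ih =>
    intro a pre
    have hget : (pre ++ pvAccumB (v :: r) a).getD pre.length 0 = a := by
      show (pre ++ a :: pvAccumB r (a + (v.length : Int))).getD pre.length 0 = a
      exact getD_append_cons pre a _
    by_cases hx : a < x
    · rw [pvLin_step _ x pre.length (pre.length + (v :: r).length)
        (by simp) (by rw [hget]; exact hx)]
      have hre : pre ++ pvAccumB (v :: r) a
          = (pre ++ [a]) ++ pvAccumB r (a + (v.length : Int)) := by
        show pre ++ a :: pvAccumB r (a + (v.length : Int)) = _
        simp
      have hlen : pre.length + 1 = (pre ++ [a]).length := by simp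
      have hlen2 : pre.length + (v :: r).length = (pre ++ [a]).length + r.length := by
        simp; omega
      rw [hre, hlen2, hlen, ih (a + (v.length : Int)) (pre ++ [a])]
      rw [pvFst_cons, if_pos hx]
      simp; omega
    · rw [pvLin_stop_at _ x _ _ (by rw [hget]; exact hx)]
      rw [pvFst_cons, if_neg hx]
      simp

theorem pvLin_accum' (x : Int) (l : List (List String)) (a : Int) (pre : List Int)
    (lo hi : Nat) (h1 : lo = pre.length) (h2 : hi = pre.length + l.length) :
    pvLin (pre ++ pvAccumB l a) x lo hi = lo + pvFst l a x := by
  subst h1; subst h2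
  exact pvLin_accum x l a pre

-- count shift and bound -------------------------------------------------------

theorem pvFst_shift (c : Int) : ∀ (l : List (List String)) (a x : Int),
    pvFst l (c + a) (c + x) = pvFst l a x := by
  intro l
  induction l with
  | nil => intro a x; rfl
  | cons v r ih =>
    intro a x
    rw [pvFst_cons, pvFst_cons]
    by_cases h : a < x
    · rw [if_pos h, if_pos (by omega), add_assoc, ih]
    · rw [if_neg h, if_neg (by omega)]

theorem pvFst_le (l : List (List String)) (a x : Int) : pvFst l a x ≤ l.length := by
  induction l generalizing a with
  | nil => simp [pvFst]
  | cons v r ih =>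
    rw [pvFst_cons]
    split
    · simpa using ih (a + (v.length : Int))
    · simp

-- main equality ---------------------------------------------------------------

theorem main_eq (l : List (List String)) :
    organize_search_terms l = organize_search_terms_alt l := by
  have hmono : ∀ i j, i ≤ j → j < (pvAccumB l 0).length →
      (pvAccumB l 0).getD i 0 ≤ (pvAccumB l 0).getD j 0 := by
    intro i j hij hj
    exact pvAccumB_mono l 0 i j hij (by rw [pvAccumB_length] at hj; omega)
  have hlen : l.length ≤ (pvAccumB l 0).length := by rw [pvAccumB_length]; omega
  have hK : bisectLeftB (pvAccumB l 0) 30 0 l.length = pvFst l 0 30 := by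
    rw [bl_eq_lin (pvAccumB l 0) 30 hmono l.length 0 l.length (by omega) hlen]
    have := pvLin_accum 30 l 0 []
    simpa using this
  set K := pvFst l 0 30 with hKdef
  have hKle : K ≤ l.length := pvFst_le l 0 30
  have hgetD : (pvAccumB l 0).getD K 0 = 0 + sumL (l.take K) :=
    pvAccumB_getD l 0 K hKle
  have hJ : bisectLeftB (pvAccumB l 0) ((pvAccumB l 0).getD K 0 + 20) K l.length
      = K + pvFst (l.drop K) 0 20 := by
    rw [bl_eq_lin (pvAccumB l 0) _ hmono l.length K l.length (by omega) hlen, hgetD]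
    have hsplit : pvAccumB l 0
        = accHead (l.take K) 0 ++ pvAccumB (l.drop K) (0 + sumL (l.take K)) := by
      rw [← pvAccumB_append, List.take_append_drop]
    have hlenK : (accHead (l.take K) 0).length = K := by
      rw [accHead_length, List.length_take]; omega
    have hhi : l.length = (accHead (l.take K) 0).length + (l.drop K).length := by
      rw [hlenK, List.length_drop]; omega
    rw [hsplit]
    rw [pvLin_accum' (0 + sumL (l.take K) + 20) (l.drop K) (0 + sumL (l.take K))
      (accHead (l.take K) 0) K l.length hlenK.symm hhi]
    congr 1
    have hshift := pvFst_shift (sumL (l.take K)) (l.drop K) 0 20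
    calc pvFst (l.drop K) (0 + sumL (l.take K)) (0 + sumL (l.take K) + 20)
        = pvFst (l.drop K) (sumL (l.take K) + 0) (sumL (l.take K) + 20) := by ring_nf
      _ = pvFst (l.drop K) 0 20 := hshift
  show organizeGoA l [] [] = _
  rw [goA_desktop l []]
  simp only [organize_search_terms_alt]
  rw [hK, hJ]
  simp only [List.length_nil, Nat.cast_zero, ← hKdef]
  rw [goM_eq]
  simp

-- ===== VERDICT (by name: the statement is the Claim_ definition above) =====
theorem organize_search_terms_spec : Claim_equal_organize_search_terms := by
  intro l _
  unfold Spec_organize_search_terms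
  exact main_eq l
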